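-- pv_equiv track=rewrite | github.com/gaboza12/we-are-algorithm | 724thomas/Week7 DynamicProgramming1/2565.py | solution
-- ===== SOURCE A (Python) =====
-- from bisect import bisect_left
--
-- def solution(n, arr):
--     arr.sort()
--     b_values = [x[1] for x in arr]
--
--     stack = []
--     for v in b_values:
--         pos = bisect_left(stack, v)
--         if pos == len(stack):
--             stack.append(v)
--         else:
--             stack[pos] = v
--
--     return n - len(stack)
-- ===== SOURCE B (Python) =====
-- def solution(n, arr):
--     arr.sort()
--     b_values = [x[1] for x in arr]
--
--     pairs = []  # (value, length of longest strictly increasing run ending at it)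
--     for v in b_values:
--         best = 1
--         for (u, d) in pairs:
--             if u < v and d + 1 > best:
--                 best = d + 1
--         pairs.append((v, best))
--
--     longest = 0
--     for (_, d) in pairs:
--         if d > longest:
--             longest = d
--     return n - longest
-- ===== Notes on version B (the rewrite author's own statement) =====
-- stated objective: alternative
-- what changed: Replaced the patience-sorting bisect stack with the classic quadratic DP that records, for each element, the length of the longest strictly increasing subsequence ending there, returning n minus the maximum such length.
import Mathlib
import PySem

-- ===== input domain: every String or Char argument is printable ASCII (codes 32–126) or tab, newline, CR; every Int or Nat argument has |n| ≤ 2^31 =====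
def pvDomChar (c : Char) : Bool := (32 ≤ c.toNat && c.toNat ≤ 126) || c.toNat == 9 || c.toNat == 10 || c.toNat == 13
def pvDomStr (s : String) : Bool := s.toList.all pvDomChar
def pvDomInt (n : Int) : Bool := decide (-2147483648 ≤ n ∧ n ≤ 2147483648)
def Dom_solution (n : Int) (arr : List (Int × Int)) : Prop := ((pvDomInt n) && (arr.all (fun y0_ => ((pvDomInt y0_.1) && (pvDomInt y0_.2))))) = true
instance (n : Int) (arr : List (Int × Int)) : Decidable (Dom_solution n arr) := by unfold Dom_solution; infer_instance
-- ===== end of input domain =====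

-- B replaces A's patience-sorting bisect stack by the quadratic longest-increasing-subsequence DP
-- (alternative algorithm, same return value; both Pythons sort `arr` in place, so side effects match too).

-- ===== PORT A =====
-- one step of A's loop body: bisect into the stack, append at the end or overwrite
def patStep (s : List Int) (v : Int) : List Int :=
  let pos := PySem.List.bisectLeft s v
  if pos = s.length then s ++ [v] else s.set pos v

def solution (n : Int) (arr : List (Int × Int)) : Int :=
  let sortedArr := PySem.List.sorted2 arr Prod.fst Prod.snd   -- arr.sort() (tuple order)
  let bValues := sortedArr.map Prod.snd
  let stack := bValues.foldl patStep []
  n - (stack.length : Int)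

-- ===== PORT B =====
-- inner loop of B: best strictly-increasing run length ending at v, given earlier (value, length) pairs
def dpBest (ps : List (Int × Int)) (v : Int) : Int :=
  ps.foldl (fun best p => if p.1 < v ∧ p.2 + 1 > best then p.2 + 1 else best) 1

def dpStep (ps : List (Int × Int)) (v : Int) : List (Int × Int) :=
  ps ++ [(v, dpBest ps v)]

def solution_alt (n : Int) (arr : List (Int × Int)) : Int :=
  let sortedArr := PySem.List.sorted2 arr Prod.fst Prod.snd   -- arr.sort() (tuple order)
  let bValues := sortedArr.map Prod.snd
  let pairs := bValues.foldl dpStep []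
  let longest := pairs.foldl (fun l p => if p.2 > l then p.2 else l) 0
  n - longest

-- ===== PRECONDITION & SPEC =====
def Spec_solution (n : Int) (arr : List (Int × Int)) (out : Int) : Prop := out = solution_alt n arr
instance (n : Int) (arr : List (Int × Int)) (out : Int) : Decidable (Spec_solution n arr out) := by unfold Spec_solution; infer_instance

-- ===== CLAIM (what is proved, stated in full; the proofs are below) =====
def Claim_equal_solution : Prop := ∀ (n : Int) (arr : List (Int × Int)), Dom_solution n arr → Spec_solution n arr (solution n arr)

-- ===== LEMMAS AND PROOFS =====

-- maximum dp value recorded in ps (B's final loop computes exactly this)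
def maxDp (ps : List (Int × Int)) : Int := ps.foldl (fun l p => max l p.2) 0

-- the pairs of ps whose value is < v, and the maximum dp value among them
def elig (ps : List (Int × Int)) (v : Int) : List (Int × Int) := ps.filter (fun p => decide (p.1 < v))
def eligMax (ps : List (Int × Int)) (v : Int) : Int := (elig ps v).foldl (fun a p => max a p.2) 0

lemma longest_eq_maxDp (ps : List (Int × Int)) :
    ps.foldl (fun l p => if p.2 > l then p.2 else l) 0 = maxDp ps := by
  have h : (fun (l : Int) (p : Int × Int) => if p.2 > l then p.2 else l)
      = fun l p => max l p.2 := by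
    funext l p
    split_ifs <;> omega
  rw [maxDp, h]

lemma maxDp_ub (ps : List (Int × Int)) : ∀ p ∈ ps, p.2 ≤ maxDp ps :=
  (PySem.List.le_foldl_max_int ps Prod.snd 0).2

lemma maxDp_append (ps : List (Int × Int)) (q : Int × Int) :
    maxDp (ps ++ [q]) = max (maxDp ps) q.2 := by
  simp [maxDp, List.foldl_append]

lemma dpBest_shift (v : Int) (ps : List (Int × Int)) (a : Int) :
    ps.foldl (fun best p => if p.1 < v ∧ p.2 + 1 > best then p.2 + 1 else best) (1 + a)
      = 1 + ps.foldl (fun b p => if p.1 < v then max b p.2 else b) a := by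
  induction ps generalizing a with
  | nil => rfl
  | cons p t ih =>
    simp only [List.foldl_cons]
    have : (if p.1 < v ∧ p.2 + 1 > 1 + a then p.2 + 1 else 1 + a)
        = 1 + (if p.1 < v then max a p.2 else a) := by
      by_cases h : p.1 < v <;> simp [h] <;> omega
    rw [this, ih]

lemma foldl_if_filter (v : Int) (ps : List (Int × Int)) (a : Int) :
    ps.foldl (fun b p => if p.1 < v then max b p.2 else b) a
      = (elig ps v).foldl (fun b p => max b p.2) a := by
  induction ps generalizing a with
  | nil => rfl
  | cons p t ih =>
    by_cases h : p.1 < v <;> simp [elig, h, ih]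

lemma dpBest_eq (ps : List (Int × Int)) (v : Int) :
    dpBest ps v = 1 + eligMax ps v := by
  have := dpBest_shift v ps 0
  simpa [dpBest, eligMax, foldl_if_filter v ps 0] using this

lemma foldl_max_le {c : Int} (l : List (Int × Int)) (a : Int)
    (ha : a ≤ c) (hl : ∀ p ∈ l, p.2 ≤ c) :
    l.foldl (fun b p => max b p.2) a ≤ c := by
  induction l generalizing a with
  | nil => simpa using ha
  | cons p t ih =>
    simp only [List.foldl_cons]
    exact ih _ (by have := hl p (by simp); omega) (fun q hq => hl q (by simp [hq]))

lemma eligMax_nonneg (ps : List (Int × Int)) (v : Int) : 0 ≤ eligMax ps v :=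
  (PySem.List.le_foldl_max_int (elig ps v) Prod.snd 0).1

lemma eligMax_lb (ps : List (Int × Int)) (v : Int) :
    ∀ p ∈ ps, p.1 < v → p.2 ≤ eligMax ps v := by
  intro p hp hpv
  exact (PySem.List.le_foldl_max_int (elig ps v) Prod.snd 0).2 p
    (by simp [elig, List.mem_filter, hp, hpv])

-- the coupling invariant between A's stack and B's dp pairs:
-- (a) the stack length is the maximum dp value;
-- (b) stack[k] is the least value at which a dp value ≥ k+1 is attained.
def StackInv (s : List Int) (ps : List (Int × Int)) : Prop :=
  (s.length : Int) = maxDp ps ∧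
  ∀ k, (hk : k < s.length) →
    (∃ p ∈ ps, (k : Int) + 1 ≤ p.2 ∧ p.1 = s[k]) ∧
    (∀ p ∈ ps, (k : Int) + 1 ≤ p.2 → s[k] ≤ p.1)

lemma stackInv_sorted {s : List Int} {ps : List (Int × Int)} (h : StackInv s ps) :
    s.Pairwise (· ≤ ·) := by
  rw [List.pairwise_iff_getElem]
  intro i j hi hj hij
  obtain ⟨p, hp, hpd, hpv⟩ := (h.2 j hj).1
  have := (h.2 i hi).2 p hp (by omega)
  omega

lemma stackInv_step {s : List Int} {ps : List (Int × Int)} (h : StackInv s ps) (v : Int) :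
    StackInv (patStep s v) (dpStep ps v) := by
  obtain ⟨hlen, hidx⟩ := h
  obtain ⟨hpos_le, hlt, hge⟩ := PySem.List.bisectLeft_spec s v (stackInv_sorted ⟨hlen, hidx⟩)
  set pos := PySem.List.bisectLeft s v with hposdef
  -- every eligible dp value is at most pos
  have helig_ub : ∀ p ∈ ps, p.1 < v → p.2 ≤ (pos : Int) := by
    intro p hp hpv
    by_contra hcon
    have hposlt : pos < s.length := by
      have := maxDp_ub ps p hp; omega
    have h1 : v ≤ s[pos] := hge pos hposlt le_rfl
    have h2 : s[pos] ≤ p.1 := (hidx pos hposlt).2 p hp (by omega)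
    omega
  have hE_le : eligMax ps v ≤ (pos : Int) :=
    foldl_max_le _ 0 (by positivity)
      (fun p hp => helig_ub p (List.mem_of_mem_filter hp)
        (by have := List.of_mem_filter hp; simpa using this))
  have hE_ge : (pos : Int) ≤ eligMax ps v := by
    rcases Nat.eq_zero_or_pos pos with h0 | h0
    · rw [h0]; exact_mod_cast eligMax_nonneg ps v
    · have hk : pos - 1 < s.length := by omega
      obtain ⟨p, hp, hpd, hpv⟩ := (hidx (pos - 1) hk).1
      have hsv : s[pos - 1] < v := hlt (pos - 1) hk (by omega)
      have := eligMax_lb ps v p hp (by omega)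
      have : (pos : Int) - 1 + 1 ≤ eligMax ps v := by
        push_cast [Nat.cast_sub h0] at hpd ⊢; omega
      omega
  have hbest : dpBest ps v = (pos : Int) + 1 := by
    rw [dpBest_eq]; omega
  have hM : maxDp (dpStep ps v) = max (maxDp ps) ((pos : Int) + 1) := by
    rw [dpStep, maxDp_append, hbest]
  by_cases hend : pos = s.length
  · -- append case
    have hstack : patStep s v = s ++ [v] := by rw [patStep, ← hposdef, if_pos hend]
    constructor
    · rw [hstack, hM]
      simp only [List.length_append, List.length_cons, List.length_nil]
      omega
    · intro k hk'
      simp only [hstack] at hk' ⊢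
      simp only [List.length_append, List.length_cons, List.length_nil] at hk'
      by_cases hkl : k < s.length
      · rw [List.getElem_append_left hkl]
        refine ⟨?_, ?_⟩
        · obtain ⟨p, hp, hpd, hpv⟩ := (hidx k hkl).1
          exact ⟨p, by simp [dpStep, hp], hpd, hpv⟩
        · intro p hp hpd
          rcases (by simpa [dpStep] using hp : p ∈ ps ∨ p = (v, dpBest ps v)) with hp' | hp'
          · exact (hidx k hkl).2 p hp' hpd
          · subst hp'
            have := hlt k hkl (by omega)
            simp; omega
      · have hkeq : k = s.length := by omega
        rw [List.getElem_concat_length hkeq]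
        refine ⟨⟨(v, dpBest ps v), by simp [dpStep], ?_, rfl⟩, ?_⟩
        · rw [hbest]; omega
        · intro p hp hpd
          rcases (by simpa [dpStep] using hp : p ∈ ps ∨ p = (v, dpBest ps v)) with hp' | hp'
          · have := maxDp_ub ps p hp'; omega
          · subst hp'; simp
  · -- overwrite case
    have hposlt : pos < s.length := by omega
    have hstack : patStep s v = s.set pos v := by rw [patStep, ← hposdef, if_neg hend]
    constructor
    · rw [hstack, hM, List.length_set]; omega
    · intro k hk'
      simp only [hstack] at hk' ⊢
      rw [List.length_set] at hk'
      rw [List.getElem_set]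
      by_cases hkp : pos = k
      · rw [if_pos hkp]
        have hpk : (pos : Int) = (k : Int) := by exact_mod_cast hkp
        refine ⟨⟨(v, dpBest ps v), by simp [dpStep], ?_, rfl⟩, ?_⟩
        · rw [hbest]; omega
        · intro p hp hpd
          rcases (by simpa [dpStep] using hp : p ∈ ps ∨ p = (v, dpBest ps v)) with hp' | hp'
          · by_contra hcon
            have := helig_ub p hp' (by omega)
            omega
          · subst hp'; simp
      · rw [if_neg hkp]
        refine ⟨?_, ?_⟩
        · obtain ⟨p, hp, hpd, hpv⟩ := (hidx k hk').1
          exact ⟨p, by simp [dpStep, hp], hpd, hpv⟩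
        · intro p hp hpd
          rcases (by simpa [dpStep] using hp : p ∈ ps ∨ p = (v, dpBest ps v)) with hp' | hp'
          · exact (hidx k hk').2 p hp' hpd
          · subst hp'
            rw [hbest] at hpd
            have hklt : k < pos := by
              simp only at hpd
              by_contra hnk
              have : (pos : Int) ≤ (k : Int) := by exact_mod_cast Nat.le_of_not_lt hnk
              rcases Nat.lt_or_ge k pos with h1 | h1
              · omega
              · have : pos = k := by omega
                exact hkp this
            have := hlt k hk' hklt
            simp; omega

lemma stackInv_foldl (bs : List Int) :
    ∀ s ps, StackInv s ps → StackInv (bs.foldl patStep s) (bs.foldl dpStep ps) := by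
  induction bs with
  | nil => intro s ps h; exact h
  | cons v t ih =>
    intro s ps h
    simp only [List.foldl_cons]
    exact ih _ _ (stackInv_step h v)

lemma stackInv_nil : StackInv [] [] := by
  refine ⟨by simp [maxDp], ?_⟩
  intro k hk; simp at hk

-- ===== VERDICT (by name: the statement is the Claim_ definition above) =====
theorem solution_spec : Claim_equal_solution := by
  unfold Claim_equal_solution
  intro n arr _
  unfold Spec_solution solution solution_alt
  have h := stackInv_foldl ((PySem.List.sorted2 arr Prod.fst Prod.snd).map Prod.snd) [] [] stackInv_nil
  change n - ((((PySem.List.sorted2 arr Prod.fst Prod.snd).map Prod.snd).foldl patStep []).length : Int)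
      = n - ((((PySem.List.sorted2 arr Prod.fst Prod.snd).map Prod.snd).foldl dpStep []).foldl
          (fun l p => if p.2 > l then p.2 else l) 0)
  rw [longest_eq_maxDp, ← h.1]
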